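-- pv_equiv track=rewrite | github.com/magickris93/bioinf_wdi | kolokwia/1/2012.py | sumy
-- ===== SOURCE A (Python) =====
-- def sumy(l):
--     """
--     Funkcja zwracająca listę sum poszczególnych segmentów listy, to jest
--     fragmentów oddzielonych końcami listy, bądź zerami.
--     :param l: lista liczb
--     :return: lista sum segementów listy
--     """
--     wynik = []
--     suma = 0
--     ile = 0
--     for x in l:
--         if x != 0:
--             suma += x
--             ile += 1
--         else:
--             if ile > 0:
--                 wynik.append(suma)
--                 suma = 0
--                 ile = 0
--     return wynik
-- ===== SOURCE B (Python) =====
-- def sumy(l):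
--     l = list(l)
--     res = []
--     while 0 in l:
--         j = l.index(0)
--         if j > 0:
--             res.append(sum(l[:j]))
--         l = l[j + 1:]
--     return res
-- ===== Notes on version B (the rewrite author's own statement) =====
-- stated objective: simpler
-- what changed: Replaces A's element-by-element accumulator loop (running sum + element counter, flushed on each zero) by a zero-to-zero decomposition: repeatedly find the first zero, sum the slice before it and continue past it; the open trailing run is dropped automatically because it contains no zero.
import Mathlib
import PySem

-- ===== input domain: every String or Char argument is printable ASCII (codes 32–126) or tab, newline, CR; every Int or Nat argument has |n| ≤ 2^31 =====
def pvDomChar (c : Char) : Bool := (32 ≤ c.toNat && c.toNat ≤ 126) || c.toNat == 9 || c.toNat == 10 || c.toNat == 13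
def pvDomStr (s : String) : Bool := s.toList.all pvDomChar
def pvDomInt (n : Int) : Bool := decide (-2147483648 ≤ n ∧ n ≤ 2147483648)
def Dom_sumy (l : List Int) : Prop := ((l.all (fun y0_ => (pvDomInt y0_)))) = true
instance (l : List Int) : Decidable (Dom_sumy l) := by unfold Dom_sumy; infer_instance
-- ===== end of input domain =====

-- B rewrites A's single-pass accumulator loop (running sum + counter, flushed on each zero)
-- as a zero-to-zero decomposition: find the first zero, sum the slice before it, continue past it.

-- ===== PORT A =====
-- literal transliteration of A's for-loop: state (wynik, suma, ile), one step per element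
def sumyLoop : List Int → List Int → Int → Int → List Int
  | [], wynik, _, _ => wynik
  | x :: xs, wynik, suma, ile =>
    if x ≠ 0 then sumyLoop xs wynik (suma + x) (ile + 1)
    else if ile > 0 then sumyLoop xs (wynik ++ [suma]) 0 0
    else sumyLoop xs wynik suma ile

def sumy (l : List Int) : List Int := sumyLoop l [] 0 0

-- ===== PORT B =====
-- transliteration of Source B's while-loop: 'while 0 in l: j = l.index(0); …; l = l[j+1:]'
def sumyAltLoop (l : List Int) (res : List Int) : List Int :=
  if _h : 0 ∈ l then
    let j := l.idxOf 0
    sumyAltLoop (l.drop (j + 1)) (if j > 0 then res ++ [(l.take j).sum] else res)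
  else res
termination_by l.length
decreasing_by
  have := List.idxOf_lt_length_of_mem _h
  simp only [List.length_drop]
  omega

def sumy_alt (l : List Int) : List Int := sumyAltLoop l []

-- ===== PRECONDITION & SPEC =====
def Spec_sumy (l : List Int) (out : List Int) : Prop := out = sumy_alt l
instance (l : List Int) (out : List Int) : Decidable (Spec_sumy l out) := by unfold Spec_sumy; infer_instance

-- ===== CLAIM (what is proved, stated in full; the proofs are below) =====
def Claim_equal_sumy : Prop := ∀ (l : List Int), Dom_sumy l → Spec_sumy l (sumy l)

-- ===== LEMMAS AND PROOFS =====

-- B's loop with its accumulator peeled off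
theorem sumyAltLoop_acc : ∀ (n : Nat) (l res : List Int), l.length ≤ n →
    sumyAltLoop l res = res ++ sumyAltLoop l [] := by
  intro n
  induction n with
  | zero =>
    intro l res hl
    have : l = [] := List.eq_nil_of_length_eq_zero (Nat.le_zero.mp hl)
    subst this
    simp [sumyAltLoop]
  | succ n ih =>
    intro l res hl
    by_cases hm : 0 ∈ l
    · have hj := List.idxOf_lt_length_of_mem hm
      conv_lhs => rw [sumyAltLoop]
      conv_rhs => rw [sumyAltLoop]
      simp only [hm, dif_pos]
      have hlen : (l.drop (l.idxOf 0 + 1)).length ≤ n := by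
        simp only [List.length_drop]; omega
      rw [ih _ _ hlen, ih _ _ hlen]
      have hone := ih (l.drop (l.idxOf 0 + 1)) [(l.take (l.idxOf 0)).sum] hlen
      by_cases hpos : l.idxOf 0 > 0 <;> simp [hpos, hone]
    · conv_lhs => rw [sumyAltLoop]
      conv_rhs => rw [sumyAltLoop]
      simp [hm]

-- A's loop with its accumulator peeled off
theorem sumyLoop_acc : ∀ (l w : List Int) (s c : Int),
    sumyLoop l w s c = w ++ sumyLoop l [] s c := by
  intro l
  induction l with
  | nil => intro w s c; simp [sumyLoop]
  | cons x xs ih =>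
    intro w s c
    simp only [sumyLoop]
    split_ifs with h1 h2
    · exact ih w _ _
    · rw [ih (w ++ [s]), ih ([] ++ [s])]; simp
    · exact ih w _ _

-- the "pending nonempty segment with partial sum s" view of B
def Bp (s : Int) (l : List Int) : List Int :=
  if 0 ∈ l then (s + (l.take (l.idxOf 0)).sum) :: sumy_alt (l.drop (l.idxOf 0 + 1)) else []

theorem alt_nil : sumy_alt [] = [] := by simp [sumy_alt, sumyAltLoop]

theorem alt_cons_zero (xs : List Int) : sumy_alt ((0 : Int) :: xs) = sumy_alt xs := by
  show sumyAltLoop ((0 : Int) :: xs) [] = sumy_alt xs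
  rw [sumyAltLoop]
  simp [List.idxOf_cons_self, sumy_alt]

theorem alt_cons_ne (x : Int) (xs : List Int) (hx : x ≠ 0) :
    sumy_alt (x :: xs) = Bp x xs := by
  by_cases hm : 0 ∈ xs
  · have hmem : (0 : Int) ∈ x :: xs := List.mem_cons_of_mem _ hm
    have hidx : (x :: xs).idxOf 0 = xs.idxOf 0 + 1 := by
      simp [hx]
    show sumyAltLoop (x :: xs) [] = Bp x xs
    rw [sumyAltLoop]
    simp only [hmem, dif_pos, hidx, Bp, if_pos hm, List.drop_succ_cons, List.take_succ_cons,
      gt_iff_lt, Nat.succ_pos, if_pos, List.nil_append, List.sum_cons]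
    rw [sumyAltLoop_acc (xs.drop (xs.idxOf 0 + 1)).length _ _ (le_refl _)]
    simp [sumy_alt]
  · have hmem : (0 : Int) ∉ x :: xs := by simp [hm, Ne.symm hx]
    show sumyAltLoop (x :: xs) [] = Bp x xs
    rw [sumyAltLoop]
    simp [hmem, Bp, hm]

theorem Bp_cons_ne (s x : Int) (xs : List Int) (hx : x ≠ 0) :
    Bp s (x :: xs) = Bp (s + x) xs := by
  by_cases hm : 0 ∈ xs
  · have hmem : (0 : Int) ∈ x :: xs := List.mem_cons_of_mem _ hm
    have hidx : (x :: xs).idxOf 0 = xs.idxOf 0 + 1 := by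
      simp [hx]
    simp only [Bp, if_pos hm, if_pos hmem, hidx]
    rw [List.take_succ_cons, List.drop_succ_cons, List.sum_cons, add_assoc]
  · have hmem : (0 : Int) ∉ x :: xs := by simp [hm, Ne.symm hx]
    simp [Bp, hm, hmem]

theorem main : ∀ (l : List Int),
    (∀ s c : Int, 0 < c → sumyLoop l [] s c = Bp s l) ∧ sumyLoop l [] 0 0 = sumy_alt l := by
  intro l
  induction l with
  | nil =>
    refine ⟨fun s c _ => ?_, ?_⟩ <;> simp [sumyLoop, Bp, alt_nil]
  | cons x xs ih =>
    refine ⟨fun s c hc => ?_, ?_⟩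
    · by_cases hx : x = 0
      · subst hx
        rw [show sumyLoop ((0:Int) :: xs) [] s c = sumyLoop xs ([] ++ [s]) 0 0 from by rw [sumyLoop, if_neg (by decide), if_pos hc], List.nil_append]
        rw [sumyLoop_acc, ih.2]
        simp only [Bp, List.mem_cons, true_or, if_pos, List.idxOf_cons_self]
        simp
      · simp only [sumyLoop, if_pos hx]
        rw [ih.1 (s + x) (c + 1) (by omega), Bp_cons_ne _ _ _ hx]
    · by_cases hx : x = 0
      · subst hx
        rw [show sumyLoop ((0:Int) :: xs) [] 0 0 = sumyLoop xs [] 0 0 from by rw [sumyLoop, if_neg (by decide), if_neg (by decide)]]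
        rw [ih.2, alt_cons_zero]
      · simp only [sumyLoop, if_pos hx]
        rw [ih.1 (0 + x) (0 + 1) (by omega), alt_cons_ne _ _ hx, zero_add]

-- ===== VERDICT (by name: the statement is the Claim_ definition above) =====
theorem sumy_spec : Claim_equal_sumy := by
  intro l _
  unfold Spec_sumy sumy
  exact (main l).2
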